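-- pv_equiv track=rewrite | github.com/JavierCR16/Tarea-Programada-Domino | PrograDomino.py | salte
-- ===== SOURCE A (Python) =====
-- def salte(tira, linea):
--     """ Sin considerar los espacios en blanco, retorna el resto
--         de línea a partir del punto en que aparece tira.
--         Si tira no aparece al inicio de línea, retorna la línea
--         original.
--     """
--     # Omite blancos
--     i = 0
--     while i < len(linea) and linea[i] == " ":
--         i += 1
--
--     # Compara si tira ocurre al inicio de linea
--     j = 0
--     while i < len(linea) and j < len(tira) and linea[i] == tira[j]:
--         i += 1
--         j += 1
--
--     if j == len(tira):
--         # Se encontró una ocurrencia de tira al inicio de línea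
--         return linea[i:]
--
--     # No se encontró una ocurrencia de tira al inicio de linea.
--     return linea
-- ===== SOURCE B (Python) =====
-- def salte(tira, linea):
--     """Iterator-pipeline re-implementation: consume one shared character
--     iterator (no indices, no slices of linea); the first non-space char is
--     pulled with a generator, the rest of tira is matched by pulling next()."""
--     it = iter(linea)
--     head = next((c for c in it if c != " "), None)
--     if tira == "":
--         rest = "".join(it)
--         return rest if head is None else head + rest
--     if head != tira[0]:
--         return linea
--     for t in tira[1:]:
--         if next(it, None) != t:
--             return linea
--     return "".join(it)
-- ===== Notes on version B (the rewrite author's own statement) =====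
-- stated objective: alternative
-- what changed: Replaces A's two index-scanning while-loops and final slice with a single shared character iterator: a generator pulls the first non-space char, a for-loop over tira[1:] matches by consuming next(it, None), and the remainder is rebuilt with ''.join(it) - no indices or slices of linea at all. (constant-factor speedup from avoiding per-character indexing)
import Mathlib
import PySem

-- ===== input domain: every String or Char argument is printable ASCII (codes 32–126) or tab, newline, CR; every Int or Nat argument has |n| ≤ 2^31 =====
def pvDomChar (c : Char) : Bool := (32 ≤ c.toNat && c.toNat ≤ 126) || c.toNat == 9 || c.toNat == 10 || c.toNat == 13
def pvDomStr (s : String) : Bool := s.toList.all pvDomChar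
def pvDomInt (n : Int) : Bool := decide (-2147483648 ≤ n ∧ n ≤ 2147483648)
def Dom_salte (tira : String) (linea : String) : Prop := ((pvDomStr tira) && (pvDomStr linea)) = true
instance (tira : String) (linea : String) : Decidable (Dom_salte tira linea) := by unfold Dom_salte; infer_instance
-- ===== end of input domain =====

-- B replaces A's two index-scanning while-loops and final slice with a single shared character
-- iterator that is consumed across the phases, rebuilding the remainder with join (alternative decomposition; same cost).

-- ===== PORT A =====
-- first while loop of A: advance i while linea[i] == ' '
def salteSkip (l : List Char) (i : Nat) : Nat :=
  if h : i < l.length then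
    if l[i] = ' ' then salteSkip l (i + 1) else i
  else i
termination_by l.length - i

-- second while loop of A: advance i and j while linea[i] == tira[j]
def salteMatch (t l : List Char) (i j : Nat) : Nat × Nat :=
  if h : i < l.length ∧ j < t.length then
    if l[i]'h.1 = t[j]'h.2 then salteMatch t l (i + 1) (j + 1) else (i, j)
  else (i, j)
termination_by l.length - i

def salte (tira : String) (linea : String) : String :=
  let i0 := salteSkip linea.toList 0
  let p := salteMatch tira.toList linea.toList i0 0
  if p.2 = tira.toList.length then PySem.Str.slice linea (some (p.1 : Int)) none
  else linea

-- ===== PORT B =====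
-- the generator next((c for c in it if c != " "), None): first non-space char and the iterator state after it
def salteHead : List Char → Option Char × List Char
  | [] => (none, [])
  | c :: cs => if c ≠ ' ' then (some c, cs) else salteHead cs

-- the for-loop over tira[1:] pulling next(it, None) and comparing
def salteLoop : List Char → List Char → Option (List Char)
  | [], rest => some rest
  | t :: ts, rest => if rest.head? = some t then salteLoop ts rest.tail else none

def salte_alt (tira : String) (linea : String) : String :=
  let p := salteHead linea.toList
  match tira.toList with
  | [] =>
      match p.1 with
      | none => String.ofList p.2
      | some h => String.ofList (h :: p.2)
  | t0 :: ts =>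
      if p.1 = some t0 then
        match salteLoop ts p.2 with
        | some rest => String.ofList rest
        | none => linea
      else linea

-- ===== PRECONDITION & SPEC =====
def Spec_salte (tira : String) (linea : String) (out : String) : Prop := out = salte_alt tira linea
instance (tira : String) (linea : String) (out : String) : Decidable (Spec_salte tira linea out) := by unfold Spec_salte; infer_instance

-- ===== CLAIM (what is proved, stated in full; the proofs are below) =====
def Claim_equal_salte : Prop := ∀ (tira : String) (linea : String), Dom_salte tira linea → Spec_salte tira linea (salte tira linea)

-- ===== LEMMAS AND PROOFS =====

lemma salteSkip_drop (l : List Char) (i : Nat) :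
    l.drop (salteSkip l i) = (l.drop i).dropWhile (· == ' ') := by
  induction i using salteSkip.induct l with
  | case1 i h hs ih =>
    rw [salteSkip, dif_pos h, if_pos hs, ih,
        List.drop_eq_getElem_cons h, List.dropWhile_cons_of_pos (by simp [hs])]
  | case2 i h hs =>
    rw [salteSkip, dif_pos h, if_neg hs]
    conv_rhs => rw [List.drop_eq_getElem_cons h,
      List.dropWhile_cons_of_neg (by simp [hs]), ← List.drop_eq_getElem_cons h]
  | case3 i h =>
    rw [salteSkip, dif_neg h, List.drop_eq_nil_of_le (by omega), List.dropWhile_nil]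

lemma salteMatch_of_prefix (t l : List Char) (i j : Nat) (hj : j ≤ t.length)
    (h : t.drop j <+: l.drop i) :
    salteMatch t l i j = (i + (t.length - j), t.length) := by
  induction i, j using salteMatch.induct t l with
  | case1 i j hb he ih =>
    rw [salteMatch, dif_pos hb, if_pos he]
    rw [List.drop_eq_getElem_cons hb.2, List.drop_eq_getElem_cons hb.1] at h
    obtain ⟨-, h'⟩ := (List.cons_prefix_cons).1 h
    rw [ih (by omega) h']
    have heq : i + 1 + (t.length - (j + 1)) = i + (t.length - j) := by omega
    rw [heq]
  | case2 i j hb he =>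
    exfalso
    rw [List.drop_eq_getElem_cons hb.2, List.drop_eq_getElem_cons hb.1] at h
    exact he ((List.cons_prefix_cons).1 h).1.symm
  | case3 i j hb =>
    rw [salteMatch, dif_neg hb]
    rcases Nat.lt_or_ge j t.length with hjl | hjl
    · exfalso
      have hi : l.length ≤ i := by
        by_contra hi
        exact hb ⟨by omega, hjl⟩
      rw [List.drop_eq_nil_of_le hi] at h
      have hlen := congrArg List.length (List.prefix_nil.1 h)
      simp at hlen
      omega
    · have hje : j = t.length := le_antisymm hj hjl
      subst hje
      simp

lemma salteMatch_of_not_prefix (t l : List Char) (i j : Nat)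
    (h : ¬ t.drop j <+: l.drop i) :
    (salteMatch t l i j).2 < t.length := by
  induction i, j using salteMatch.induct t l with
  | case1 i j hb he ih =>
    rw [salteMatch, dif_pos hb, if_pos he]
    refine ih ?_
    intro h'
    apply h
    rw [List.drop_eq_getElem_cons hb.2, List.drop_eq_getElem_cons hb.1]
    exact (List.cons_prefix_cons).2 ⟨he.symm, h'⟩
  | case2 i j hb he =>
    rw [salteMatch, dif_pos hb, if_neg he]
    exact hb.2
  | case3 i j hb =>
    rw [salteMatch, dif_neg hb]
    by_contra hjl
    have hje : t.length ≤ j := by omega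
    rw [List.drop_eq_nil_of_le hje] at h
    exact h List.nil_prefix

lemma salteHead_eq (l : List Char) :
    salteHead l = ((l.dropWhile (· == ' ')).head?, (l.dropWhile (· == ' ')).tail) := by
  induction l with
  | nil => simp [salteHead]
  | cons c cs ih =>
    by_cases hc : c = ' '
    · subst hc
      rw [salteHead, if_neg (by simp), ih, List.dropWhile_cons_of_pos (by simp)]
    · rw [salteHead, if_pos hc, List.dropWhile_cons_of_neg (by simp [hc])]
      simp

lemma salteLoop_eq (ts rest : List Char) :
    salteLoop ts rest = if ts <+: rest then some (rest.drop ts.length) else none := by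
  induction ts generalizing rest with
  | nil => simp [salteLoop]
  | cons t ts ih =>
    cases rest with
    | nil => simp [salteLoop]
    | cons r rs =>
      by_cases hr : r = t
      · subst hr
        simp [salteLoop, ih, List.cons_prefix_cons]
      · rw [salteLoop, if_neg (by simp [hr])]
        rw [if_neg]
        intro h
        exact hr ((List.cons_prefix_cons.1 h).1.symm)

lemma salteAlt_char (tira linea : String) :
    salte_alt tira linea =
      if tira.toList <+: (linea.toList.dropWhile (· == ' ')) then
        String.ofList ((linea.toList.dropWhile (· == ' ')).drop tira.toList.length)
      else linea := by
  unfold salte_alt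
  rw [salteHead_eq]
  set d := linea.toList.dropWhile (· == ' ') with hd
  cases ht : tira.toList with
  | nil =>
    simp only [List.nil_prefix, if_pos, List.length_nil, List.drop_zero]
    cases d with
    | nil => rfl
    | cons c cs => rfl
  | cons t0 ts =>
    cases d with
    | nil =>
      simp [salteLoop]
    | cons c cs =>
      by_cases hc : c = t0
      · subst hc
        by_cases hts : ts <+: cs
        · simp [salteLoop_eq, hts, List.cons_prefix_cons]
        · simp [salteLoop_eq, hts, List.cons_prefix_cons]
      · simp only [List.head?_cons, List.tail_cons, Option.some.injEq]
        rw [if_neg hc, if_neg]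
        intro h
        exact hc (List.cons_prefix_cons.1 h).1.symm

theorem salte_spec : Claim_equal_salte := by
  intro tira linea _
  unfold Spec_salte salte
  simp only [salteAlt_char]
  have hdrop : linea.toList.drop (salteSkip linea.toList 0) =
      linea.toList.dropWhile (· == ' ') := by
    simpa using salteSkip_drop linea.toList 0
  by_cases hp : tira.toList <+: linea.toList.dropWhile (· == ' ')
  · have hm := salteMatch_of_prefix tira.toList linea.toList (salteSkip linea.toList 0) 0
      (Nat.zero_le _) (by simpa [hdrop] using hp)
    rw [hm]
    rw [if_pos rfl, if_pos hp]
    apply String.toList_inj.mp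
    have hc : ((tira.length : Int) + (salteSkip linea.toList 0 : Int)) =
        ((tira.length + salteSkip linea.toList 0 : Nat) : Int) := by push_cast; ring
    simp [PySem.Str.toList_slice, ← hdrop, List.drop_drop, Nat.add_comm]
    rw [hc, PySem.List.slice_from_natCast]
  · have hm := salteMatch_of_not_prefix tira.toList linea.toList (salteSkip linea.toList 0) 0
      (by simpa [hdrop] using hp)
    rw [if_neg (by omega), if_neg hp]
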